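-- pv_equiv track=rewrite | github.com/jhson929/Algorithm-Study | 프로그래머스/1/131705. 삼총사/삼총사.py | solution
-- ===== SOURCE A (Python) =====
-- def solution(number):
--     answer = 0
--
--     for a in range(0, len(number)-2):
--         for b in range(a+1, len(number)-1):
--             for c in range(b+1, len(number)):
--                 if number[a] + number[b] + number[c] == 0:
--                     answer += 1
--
--     return answer
-- ===== SOURCE B (Python) =====
-- def solution(number):
--     # O(n^2): for each pair (j, k), count earlier elements completing a zero-sum triple.
--     answer = 0
--     seen = {}
--     for j in range(len(number)):
--         x = number[j]
--         for k in range(j + 1, len(number)):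
--             answer += seen.get(-(x + number[k]), 0)
--         seen[x] = seen.get(x, 0) + 1
--     return answer
-- ===== Notes on version B (the rewrite author's own statement) =====
-- stated objective: faster
-- what changed: Replaced the O(n^3) triple nested index loop by an O(n^2) pass that, for each pair (j,k), looks up in a running hash counter how many earlier elements complete a zero-sum triple.
import Mathlib
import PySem

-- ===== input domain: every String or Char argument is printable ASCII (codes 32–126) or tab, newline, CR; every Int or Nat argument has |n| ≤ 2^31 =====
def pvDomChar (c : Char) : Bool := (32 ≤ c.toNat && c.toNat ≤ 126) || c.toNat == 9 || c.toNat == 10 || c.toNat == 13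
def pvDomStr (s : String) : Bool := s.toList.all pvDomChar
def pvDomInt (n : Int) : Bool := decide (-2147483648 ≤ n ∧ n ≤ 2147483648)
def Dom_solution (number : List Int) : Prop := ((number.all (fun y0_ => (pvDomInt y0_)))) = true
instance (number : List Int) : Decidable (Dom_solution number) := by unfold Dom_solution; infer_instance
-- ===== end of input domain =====

-- B replaces A's O(n^3) triple loop by an O(n^2) pair loop with a running counter of earlier elements.

-- ===== PORT A =====
def solution (number : List Int) : Int :=
  (PySem.List.pyRange 0 ((number.length : Int) - 2) 1).foldl (fun answer a =>
    (PySem.List.pyRange (a + 1) ((number.length : Int) - 1) 1).foldl (fun answer b =>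
      (PySem.List.pyRange (b + 1) (number.length : Int) 1).foldl (fun answer c =>
        if PySem.List.pyGetD number a 0 + PySem.List.pyGetD number b 0 +
            PySem.List.pyGetD number c 0 = 0
        then answer + 1 else answer) answer) answer) 0

-- ===== PORT B =====
def solution_alt (number : List Int) : Int :=
  ((PySem.List.pyRange 0 (number.length : Int) 1).foldl
    (fun (st : Int × PySem.Dict Int Int) j =>
      let x := PySem.List.pyGetD number j 0
      ((PySem.List.pyRange (j + 1) (number.length : Int) 1).foldl
          (fun acc k => acc + st.2.getD (-(x + PySem.List.pyGetD number k 0)) 0) st.1,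
       st.2.modify x 0 (· + 1)))
    (0, PySem.Dict.empty)).1

-- ===== PRECONDITION & SPEC =====
def Spec_solution (number : List Int) (out : Int) : Prop := out = solution_alt number
instance (number : List Int) (out : Int) : Decidable (Spec_solution number out) := by unfold Spec_solution; infer_instance

-- ===== CLAIM (what is proved, stated in full; the proofs are below) =====
def Claim_equal_solution : Prop := ∀ (number : List Int), Dom_solution number → Spec_solution number (solution number)

-- ===== LEMMAS AND PROOFS =====

-- the 0/1 indicator of a zero-sum triple at indices a < b < c
def pvF (number : List Int) (a b c : Int) : Int :=
  if PySem.List.pyGetD number a 0 + PySem.List.pyGetD number b 0 +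
      PySem.List.pyGetD number c 0 = 0 then 1 else 0

theorem sum_map_pyRange (f : Int → Int) (a b : Int) :
    ((PySem.List.pyRange a b 1).map f).sum = ∑ i ∈ Finset.Ico a b, f i := by
  rw [← List.sum_toFinset f (PySem.List.nodup_pyRange_one a b)]
  congr 1
  ext x
  simp [PySem.List.mem_pyRange_one, Finset.mem_Ico]

theorem foldl_if_sum (l : List Int) (cond : Int → Prop) [DecidablePred cond] (init : Int) :
    l.foldl (fun acc c => if cond c then acc + 1 else acc) init
      = init + (l.map fun c => if cond c then (1:Int) else 0).sum := by
  have h : (fun (acc : Int) c => if cond c then acc + 1 else acc)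
      = (fun acc c => acc + (if cond c then (1:Int) else 0)) := by
    funext acc c; split <;> simp
  rw [h, PySem.List.foldl_add]

theorem A_char (number : List Int) :
    solution number
      = ∑ a ∈ Finset.Ico (0:Int) ((number.length : Int) - 2),
          ∑ b ∈ Finset.Ico (a + 1) ((number.length : Int) - 1),
            ∑ c ∈ Finset.Ico (b + 1) (number.length : Int), pvF number a b c := by
  have h1 : ∀ (a b init : Int),
      (PySem.List.pyRange (b + 1) (number.length : Int) 1).foldl (fun answer c =>
          if PySem.List.pyGetD number a 0 + PySem.List.pyGetD number b 0 +
              PySem.List.pyGetD number c 0 = 0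
          then answer + 1 else answer) init
        = init + ∑ c ∈ Finset.Ico (b + 1) (number.length : Int), pvF number a b c := by
    intro a b init
    rw [foldl_if_sum, sum_map_pyRange]
    rfl
  have h2 : ∀ (a init : Int),
      (PySem.List.pyRange (a + 1) ((number.length : Int) - 1) 1).foldl (fun answer b =>
        (PySem.List.pyRange (b + 1) (number.length : Int) 1).foldl (fun answer c =>
          if PySem.List.pyGetD number a 0 + PySem.List.pyGetD number b 0 +
              PySem.List.pyGetD number c 0 = 0
          then answer + 1 else answer) answer) init
        = init + ∑ b ∈ Finset.Ico (a + 1) ((number.length : Int) - 1),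
            ∑ c ∈ Finset.Ico (b + 1) (number.length : Int), pvF number a b c := by
    intro a init
    have h : (fun (answer : Int) b =>
        (PySem.List.pyRange (b + 1) (number.length : Int) 1).foldl (fun answer c =>
          if PySem.List.pyGetD number a 0 + PySem.List.pyGetD number b 0 +
              PySem.List.pyGetD number c 0 = 0
          then answer + 1 else answer) answer)
        = (fun answer b => answer +
            ∑ c ∈ Finset.Ico (b + 1) (number.length : Int), pvF number a b c) := by
      funext answer b; exact h1 a b answer
    rw [h, PySem.List.foldl_add, sum_map_pyRange]
  unfold solution
  have h : (fun (answer : Int) a =>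
      (PySem.List.pyRange (a + 1) ((number.length : Int) - 1) 1).foldl (fun answer b =>
        (PySem.List.pyRange (b + 1) (number.length : Int) 1).foldl (fun answer c =>
          if PySem.List.pyGetD number a 0 + PySem.List.pyGetD number b 0 +
              PySem.List.pyGetD number c 0 = 0
          then answer + 1 else answer) answer) answer)
      = (fun answer a => answer +
          ∑ b ∈ Finset.Ico (a + 1) ((number.length : Int) - 1),
            ∑ c ∈ Finset.Ico (b + 1) (number.length : Int), pvF number a b c) := by
    funext answer a; exact h2 a answer
  rw [h, PySem.List.foldl_add, sum_map_pyRange, zero_add]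

theorem A_extended (number : List Int) :
    solution number
      = ∑ a ∈ Finset.Ico (0:Int) (number.length : Int),
          ∑ b ∈ Finset.Ico (a + 1) (number.length : Int),
            ∑ c ∈ Finset.Ico (b + 1) (number.length : Int), pvF number a b c := by
  rw [A_char]
  have hb : ∀ a : Int,
      (∑ b ∈ Finset.Ico (a + 1) ((number.length : Int) - 1),
        ∑ c ∈ Finset.Ico (b + 1) (number.length : Int), pvF number a b c)
      = ∑ b ∈ Finset.Ico (a + 1) (number.length : Int),
        ∑ c ∈ Finset.Ico (b + 1) (number.length : Int), pvF number a b c := by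
    intro a
    apply Finset.sum_subset (Finset.Ico_subset_Ico le_rfl (by omega))
    intro b hb hnb
    simp only [Finset.mem_Ico] at hb hnb
    have : Finset.Ico (b + 1) (number.length : Int) = ∅ := Finset.Ico_eq_empty (by omega)
    rw [this, Finset.sum_empty]
  calc (∑ a ∈ Finset.Ico (0:Int) ((number.length : Int) - 2),
          ∑ b ∈ Finset.Ico (a + 1) ((number.length : Int) - 1),
            ∑ c ∈ Finset.Ico (b + 1) (number.length : Int), pvF number a b c)
      = ∑ a ∈ Finset.Ico (0:Int) ((number.length : Int) - 2),
          ∑ b ∈ Finset.Ico (a + 1) (number.length : Int),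
            ∑ c ∈ Finset.Ico (b + 1) (number.length : Int), pvF number a b c := by
        exact Finset.sum_congr rfl (fun a _ => hb a)
    _ = ∑ a ∈ Finset.Ico (0:Int) (number.length : Int),
          ∑ b ∈ Finset.Ico (a + 1) (number.length : Int),
            ∑ c ∈ Finset.Ico (b + 1) (number.length : Int), pvF number a b c := by
        apply Finset.sum_subset (Finset.Ico_subset_Ico le_rfl (by omega))
        intro a ha hna
        simp only [Finset.mem_Ico] at ha hna
        apply Finset.sum_eq_zero
        intro b hb'
        simp only [Finset.mem_Ico] at hb'
        have : Finset.Ico (b + 1) (number.length : Int) = ∅ := Finset.Ico_eq_empty (by omega)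
        rw [this, Finset.sum_empty]

theorem sum_Ico_succ_top_int {m a : Int} (h : a ≤ m) (f : Int → Int) :
    ∑ i ∈ Finset.Ico a (m+1), f i = (∑ i ∈ Finset.Ico a m, f i) + f m := by
  have e : Finset.Ico a (m+1) = insert m (Finset.Ico a m) := by
    ext x; simp [Finset.mem_Ico, Finset.mem_insert]; omega
  rw [e, Finset.sum_insert (by simp), add_comm]

theorem count_take (number : List Int) (m : Nat) (hm : m ≤ number.length) (v : Int) :
    ((number.take m).count v : Int)
      = ∑ i ∈ Finset.Ico (0:Int) (m:Int),
          (if PySem.List.pyGetD number i 0 = v then (1:Int) else 0) := by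
  induction m with
  | zero => simp
  | succ m ih =>
      have hm' : m < number.length := by omega
      have hge : PySem.List.pyGetD number (m : Int) 0 = number[m] := by
        rw [PySem.List.pyGetD_natCast]
        exact List.getD_eq_getElem number 0 hm'
      rw [List.take_add_one, List.count_append, show (((m+1 : Nat)) : Int) = (m:Int) + 1 by push_cast; ring]
      rw [sum_Ico_succ_top_int (by positivity), ← ih (by omega)]
      have : number[m]? = some number[m] := List.getElem?_eq_getElem hm'
      rw [this]
      simp only [Option.toList_some, List.count_cons, List.count_nil, hge, beq_iff_eq]
      push_cast
      by_cases hmv : number[m] = v <;> simp [hmv]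


theorem B_loop (number : List Int) (m : Nat) (hm : m ≤ number.length) :
    ((PySem.List.pyRange 0 (m : Int) 1).foldl
      (fun (st : Int × PySem.Dict Int Int) j =>
        let x := PySem.List.pyGetD number j 0
        ((PySem.List.pyRange (j + 1) (number.length : Int) 1).foldl
            (fun acc k => acc + st.2.getD (-(x + PySem.List.pyGetD number k 0)) 0) st.1,
         st.2.modify x 0 (· + 1)))
      (0, PySem.Dict.empty))
      = (∑ j ∈ Finset.Ico (0:Int) (m:Int),
           ∑ k ∈ Finset.Ico (j + 1) (number.length : Int),
             ((number.take j.toNat).count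
               (-(PySem.List.pyGetD number j 0 + PySem.List.pyGetD number k 0)) : Int),
         PySem.Dict.counter (number.take m)) := by
  induction m with
  | zero =>
      rw [show ((0:Nat) : Int) = 0 by rfl, PySem.List.pyRange_one_eq_nil le_rfl]
      rw [PySem.Dict.counter_eq_foldl]
      simp
  | succ m ih =>
      have hm' : m < number.length := by omega
      have hge : PySem.List.pyGetD number (m : Int) 0 = number[m] := by
        rw [PySem.List.pyGetD_natCast]
        exact List.getD_eq_getElem number 0 hm'
      have hsome : number[m]? = some number[m] := List.getElem?_eq_getElem hm'
      rw [show (((m+1 : Nat)) : Int) = (m:Int) + 1 by push_cast; ring,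
        PySem.List.pyRange_one_succ_right (by positivity), List.foldl_append, ih (by omega)]
      simp only [List.foldl_cons, List.foldl_nil]
      rw [Prod.mk.injEq]
      constructor
      · rw [PySem.List.foldl_add, sum_map_pyRange,
          sum_Ico_succ_top_int (by positivity : (0:Int) ≤ (m:Int))]
        congr 1
        apply Finset.sum_congr rfl
        intro k _
        rw [PySem.Dict.getD_counter]
        simp
      · rw [PySem.Dict.counter_eq_foldl, PySem.Dict.counter_eq_foldl,
          List.take_add_one, hsome, List.foldl_append]
        simp [hge]

theorem B_char (number : List Int) :
    solution_alt number
      = ∑ j ∈ Finset.Ico (0:Int) (number.length : Int),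
          ∑ k ∈ Finset.Ico (j + 1) (number.length : Int),
            ∑ i ∈ Finset.Ico (0:Int) j, pvF number i j k := by
  unfold solution_alt
  rw [B_loop number number.length le_rfl]
  dsimp only
  apply Finset.sum_congr rfl
  intro j hj
  simp only [Finset.mem_Ico] at hj
  apply Finset.sum_congr rfl
  intro k _
  rw [count_take number j.toNat (by omega), show ((j.toNat : Nat) : Int) = j by omega]
  apply Finset.sum_congr rfl
  intro i _
  unfold pvF
  have : (PySem.List.pyGetD number i 0
        = -(PySem.List.pyGetD number j 0 + PySem.List.pyGetD number k 0))
      ↔ (PySem.List.pyGetD number i 0 + PySem.List.pyGetD number j 0 +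
          PySem.List.pyGetD number k 0 = 0) := by omega
  split <;> split <;> first | rfl | (exfalso; omega)

theorem sum_exchange (n : Int) (g : Int → Int → Int) :
    ∑ j ∈ Finset.Ico (0:Int) n, ∑ i ∈ Finset.Ico (0:Int) j, g i j
      = ∑ i ∈ Finset.Ico (0:Int) n, ∑ j ∈ Finset.Ico (i + 1) n, g i j := by
  rw [Finset.sum_sigma', Finset.sum_sigma']
  refine Finset.sum_nbij' (fun p => ⟨p.2, p.1⟩) (fun p => ⟨p.2, p.1⟩) ?_ ?_ ?_ ?_ ?_
  all_goals intro p hp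
  all_goals simp only [Finset.mem_sigma, Finset.mem_Ico] at hp ⊢
  all_goals first | rfl | omega

-- ===== VERDICT (by name: the statement is the Claim_ definition above) =====
theorem solution_spec : Claim_equal_solution := by
  intro number _
  unfold Spec_solution
  rw [A_extended, B_char]
  rw [show (∑ j ∈ Finset.Ico (0:Int) (number.length : Int),
        ∑ k ∈ Finset.Ico (j + 1) (number.length : Int),
          ∑ i ∈ Finset.Ico (0:Int) j, pvF number i j k)
      = ∑ j ∈ Finset.Ico (0:Int) (number.length : Int),
          ∑ i ∈ Finset.Ico (0:Int) j,
            ∑ k ∈ Finset.Ico (j + 1) (number.length : Int), pvF number i j k from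
    Finset.sum_congr rfl (fun j _ => Finset.sum_comm)]
  rw [sum_exchange (number.length : Int)
    (fun i j => ∑ k ∈ Finset.Ico (j + 1) (number.length : Int), pvF number i j k)]
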